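-- pv_equiv track=rewrite | github.com/ram1123/copperheadV2 | MVA_training/VBF/bo_plot_root.py | _encode_categorical
-- ===== SOURCE A (Python) =====
-- from collections import defaultdict, OrderedDict
--
-- def _encode_categorical(vals):
--     uniq = []
--     seen = set()
--     for v in vals:
--         if v not in seen:
--             uniq.append(v)
--             seen.add(v)
--     mapping = OrderedDict((v, i + 1) for i, v in enumerate(uniq))  # start at 1
--     enc = [mapping[v] for v in vals]
--     return enc, mapping
-- ===== SOURCE B (Python) =====
-- from collections import OrderedDict
--
--
-- def _encode_categorical(vals):
--     # One pass: maintain only the mapping itself, assigning 1-based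
--     # first-seen indices on the fly; no separate `seen` set or `uniq` list.
--     mapping = OrderedDict()
--     enc = []
--     for v in vals:
--         if v not in mapping:
--             mapping[v] = len(mapping) + 1
--         enc.append(mapping[v])
--     return enc, mapping
-- ===== Notes on version B (the rewrite author's own statement) =====
-- stated objective: simpler
-- what changed: Replaces A's three passes and three data structures (seen set, uniq list, then a dict comprehension and a lookup pass) with a single pass that maintains only the OrderedDict, assigning each new value its 1-based index as it is first seen.
import Mathlib
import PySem

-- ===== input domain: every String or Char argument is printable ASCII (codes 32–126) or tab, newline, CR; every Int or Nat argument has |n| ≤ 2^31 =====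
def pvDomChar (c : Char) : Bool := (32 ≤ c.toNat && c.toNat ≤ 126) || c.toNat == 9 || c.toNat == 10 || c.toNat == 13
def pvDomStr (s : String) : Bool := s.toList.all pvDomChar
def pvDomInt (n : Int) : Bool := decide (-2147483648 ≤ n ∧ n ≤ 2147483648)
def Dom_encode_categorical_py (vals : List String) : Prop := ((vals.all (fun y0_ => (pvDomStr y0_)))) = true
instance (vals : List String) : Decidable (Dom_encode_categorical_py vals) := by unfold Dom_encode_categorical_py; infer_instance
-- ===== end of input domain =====

-- B replaces A's three passes (seen set + uniq list, dict comprehension, lookup pass) by a single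
-- pass maintaining only the mapping dict; same return value, proved equal on all inputs.

-- ===== PORT A =====
-- `mapping[v]` in the comprehension can never raise KeyError (every v of vals is a key of mapping),
-- so `getD v 0` is exact there.
def encode_categorical_py (vals : List String) : List Int × (List (String × Int)) :=
  let st := vals.foldl
    (fun (st : List String × PySem.Set String) v =>
      if PySem.Set.contains st.2 v then st else (st.1 ++ [v], PySem.Set.add st.2 v))
    ([], PySem.Set.empty)
  let uniq := st.1
  let mapping : PySem.Dict String Int :=
    PySem.Dict.ofList ((PySem.List.enumerate uniq).map (fun p => (p.2, p.1 + 1)))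
  let enc := vals.map (fun v => mapping.getD v 0)
  (enc, mapping.items)

-- ===== PORT B =====
-- `mapping[v]` after the conditional insert can never raise KeyError, so `getD v 0` is exact there.
def encode_categorical_py_alt (vals : List String) : List Int × (List (String × Int)) :=
  let st := vals.foldl
    (fun (st : List Int × PySem.Dict String Int) v =>
      let m := if st.2.contains v then st.2 else st.2.insert v ((st.2.size : Int) + 1)
      (st.1 ++ [m.getD v 0], m))
    ([], PySem.Dict.empty)
  (st.1, st.2.items)

-- ===== PRECONDITION & SPEC =====
def Spec_encode_categorical_py (vals : List String) (out : List Int × (List (String × Int))) : Prop := out = encode_categorical_py_alt vals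
instance (vals : List String) (out : List Int × (List (String × Int))) : Decidable (Spec_encode_categorical_py vals out) := by unfold Spec_encode_categorical_py; infer_instance

-- ===== CLAIM (what is proved, stated in full; the proofs are below) =====
def Claim_equal_encode_categorical_py : Prop := ∀ (vals : List String), Dom_encode_categorical_py vals → Spec_encode_categorical_py vals (encode_categorical_py vals)

-- ===== LEMMAS AND PROOFS =====

-- the canonical items list both ports end up with: first-seen distinct values paired with 1-based indices
def dpairs (l : List String) : List (String × Int) :=
  (PySem.List.enumerate (PySem.Set.ofList l)).map (fun p => (p.2, p.1 + 1))

theorem enumerate_append_singleton (xs : List String) (x : String) (s : Int) :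
    PySem.List.enumerate (xs ++ [x]) s = PySem.List.enumerate xs s ++ [((s + xs.length : Int), x)] := by
  induction xs generalizing s with
  | nil => simp [PySem.List.enumerate_nil, PySem.List.enumerate_cons]
  | cons a t ih =>
    rw [List.cons_append, PySem.List.enumerate_cons, PySem.List.enumerate_cons, ih]
    all_goals
      have h : s + 1 + (t.length : Int) = s + ((t.length : Int) + 1) := by ring
      simp [h]

theorem keys_dpairs (l : List String) : (dpairs l).map Prod.fst = PySem.Set.ofList l := by
  simp [dpairs, Function.comp_def]

theorem dpairs_append (l : List String) (x : String) :
    dpairs (l ++ [x]) =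
      if x ∈ PySem.Set.ofList l then dpairs l
      else dpairs l ++ [(x, ((PySem.Set.ofList l).length : Int) + 1)] := by
  unfold dpairs
  rw [PySem.Set.ofList_append_singleton, PySem.Set.add_eq_ite]
  split_ifs with h
  · rfl
  · rw [enumerate_append_singleton]
    simp

theorem contains_mk_dpairs (l : List String) (x : String) :
    (PySem.Dict.mk (dpairs l)).contains x = true ↔ x ∈ l := by
  rw [PySem.Dict.contains_iff_mem_keys]
  show x ∈ (dpairs l).map Prod.fst ↔ x ∈ l
  rw [keys_dpairs]
  exact PySem.Set.mem_ofList l x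

theorem length_dpairs (l : List String) : (dpairs l).length = (PySem.Set.ofList l).length := by
  have := congrArg List.length (keys_dpairs l)
  simpa using this

theorem mk_dpairs_append_of_not_mem (l : List String) (x : String) (hx : x ∉ l) :
    PySem.Dict.mk (dpairs (l ++ [x]))
      = (PySem.Dict.mk (dpairs l)).insert x (((PySem.Dict.mk (dpairs l)).size : Int) + 1) := by
  have hc : (PySem.Dict.mk (dpairs l)).contains x = false := by
    rw [← Bool.not_eq_true, contains_mk_dpairs]; exact hx
  apply PySem.Dict.ext
  rw [PySem.Dict.items_insert_of_not_contains _ _ hc]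
  show dpairs (l ++ [x]) = dpairs l ++ [(x, ((PySem.Dict.mk (dpairs l)).size : Int) + 1)]
  rw [dpairs_append]
  rw [if_neg (fun h => hx ((PySem.Set.mem_ofList l x).mp h))]
  have hsz : (PySem.Dict.mk (dpairs l)).size = (PySem.Set.ofList l).length := by
    show (dpairs l).length = _
    exact length_dpairs l
  rw [hsz]

theorem alt_fold_invariant (l : List String) :
    l.foldl
      (fun (st : List Int × PySem.Dict String Int) v =>
        let m := if st.2.contains v then st.2 else st.2.insert v ((st.2.size : Int) + 1)
        (st.1 ++ [m.getD v 0], m))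
      ([], PySem.Dict.empty)
    = (l.map (fun v => (PySem.Dict.mk (dpairs l)).getD v 0), PySem.Dict.mk (dpairs l)) := by
  induction l using List.reverseRecOn with
  | nil => rfl
  | append_singleton l x ih =>
    rw [List.foldl_append, ih]
    by_cases hx : x ∈ l
    · have hc : (PySem.Dict.mk (dpairs l)).contains x = true := (contains_mk_dpairs l x).mpr hx
      have hd : dpairs (l ++ [x]) = dpairs l := by
        rw [dpairs_append, if_pos ((PySem.Set.mem_ofList l x).mpr hx)]
      simp only [List.foldl_cons, List.foldl_nil, hc, if_true, hd]
      simp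
    · have hc : (PySem.Dict.mk (dpairs l)).contains x = false := by
        rw [← Bool.not_eq_true, contains_mk_dpairs]; exact hx
      have hmk := mk_dpairs_append_of_not_mem l x hx
      simp only [List.foldl_cons, List.foldl_nil, hc, Bool.false_eq_true, if_false, ← hmk]
      have hmap : List.map (fun v => (PySem.Dict.mk (dpairs (l ++ [x]))).getD v 0) l
          = List.map (fun v => (PySem.Dict.mk (dpairs l)).getD v 0) l :=
        List.map_congr_left (fun v hv => by
          rw [hmk]
          exact PySem.Dict.getD_insert_of_ne _ _ _ (fun (h : v = x) => hx (h ▸ hv)))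
      rw [List.map_append, List.map_singleton, hmap]

theorem a_fold_eq (l : List String) :
    l.foldl
      (fun (st : List String × PySem.Set String) v =>
        if PySem.Set.contains st.2 v then st else (st.1 ++ [v], PySem.Set.add st.2 v))
      ([], PySem.Set.empty)
    = (PySem.Set.ofList l, PySem.Set.ofList l) := by
  induction l using List.reverseRecOn with
  | nil => rfl
  | append_singleton l x ih =>
    rw [List.foldl_append, ih, PySem.Set.ofList_append_singleton]
    simp only [List.foldl_cons, List.foldl_nil]
    by_cases hx : x ∈ PySem.Set.ofList l
    · rw [if_pos (by simpa [PySem.Set.contains_iff] using hx), PySem.Set.add_of_mem hx]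
    · rw [if_neg (by simpa [PySem.Set.contains_iff] using hx),
        PySem.Set.add_of_not_mem hx]

theorem a_mapping_eq (l : List String) :
    PySem.Dict.ofList (dpairs l) = PySem.Dict.mk (dpairs l) := by
  apply PySem.Dict.ext
  show (List.foldl (fun acc p => acc.insert p.1 p.2) PySem.Dict.empty (dpairs l)).items = dpairs l
  rw [PySem.Dict.items_foldl_insert_fresh (dpairs l) Prod.fst Prod.snd PySem.Dict.empty
    (fun a _ => by simp [PySem.Dict.contains_empty])
    (by rw [keys_dpairs]; exact PySem.Set.nodup_ofList l)]
  simp [PySem.Dict.empty]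

-- ===== VERDICT (by name: the statement is the Claim_ definition above) =====
theorem encode_categorical_py_spec : Claim_equal_encode_categorical_py := by
  intro vals _
  show encode_categorical_py vals = encode_categorical_py_alt vals
  unfold encode_categorical_py encode_categorical_py_alt
  rw [a_fold_eq, alt_fold_invariant]
  simp only []
  rw [← dpairs, a_mapping_eq]
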